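-- pv_equiv track=rewrite | github.com/pcalg/AdventOfCode2019 | app/day17_1.py | to_grid
-- ===== SOURCE A (Python) =====
-- from collections import defaultdict
--
-- def to_grid(ascii_output):
--     grid = defaultdict(lambda: '.')
--     x = 0
--     y = 0
--     for ch in ascii_output:
--         if ch == '\n':
--             y += 1
--             x = 0
--         else:
--             grid[(y, x)] = ch
--             x += 1
--
--     return grid
-- ===== SOURCE B (Python) =====
-- from collections import defaultdict
--
-- def to_grid(ascii_output):
--     grid = defaultdict(lambda: '.')
--     for y, line in enumerate(ascii_output.split('\n')):
--         for x, ch in enumerate(line):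
--             grid[(y, x)] = ch
--     return grid
-- ===== Notes on version B (the rewrite author's own statement) =====
-- stated objective: idiomatic
-- what changed: Replaces the manual x/y counter state machine over characters with splitting the string into lines and nested enumerate loops that derive the coordinates from the enumeration indices.
import Mathlib
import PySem

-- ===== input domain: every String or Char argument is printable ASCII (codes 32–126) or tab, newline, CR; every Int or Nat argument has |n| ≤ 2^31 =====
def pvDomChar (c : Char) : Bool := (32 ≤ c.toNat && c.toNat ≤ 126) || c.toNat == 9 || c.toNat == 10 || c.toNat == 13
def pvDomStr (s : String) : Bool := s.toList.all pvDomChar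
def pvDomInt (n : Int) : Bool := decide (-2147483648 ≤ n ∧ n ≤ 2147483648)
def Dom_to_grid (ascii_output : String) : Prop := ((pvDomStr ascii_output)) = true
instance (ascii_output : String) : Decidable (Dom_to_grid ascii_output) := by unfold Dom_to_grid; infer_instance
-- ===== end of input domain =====

-- B replaces A's manual x/y counters with split('\n') and nested enumerate (idiomatic; same cost).

-- ===== PORT A =====
-- A: one pass over the characters, mutating (grid, x, y); '\n' bumps y and resets x,
-- any other character is stored at (y, x). The defaultdict's default factory is not
-- observable in the returned mapping; the dict is ported as PySem.Dict, flattened to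
-- triples (y, x, ch) to fit the required signature.
def to_grid (ascii_output : String) : List (Int × Int × String) :=
  let st := ascii_output.toList.foldl
    (fun (st : PySem.Dict (Int × Int) String × Int × Int) ch =>
      let g := st.1; let x := st.2.1; let y := st.2.2
      if ch = '\n' then (g, 0, y + 1)
      else (g.insert (y, x) (String.ofList [ch]), x + 1, y))
    (PySem.Dict.empty, 0, 0)
  st.1.items.map (fun p => (p.1.1, p.1.2, p.2))

-- ===== PORT B =====
-- B: ascii_output.split('\n') ported as List.splitOn '\n' on the character list
-- (exact for the nonempty single-character separator), then nested enumerate loops.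
def to_grid_alt (ascii_output : String) : List (Int × Int × String) :=
  let lines := ascii_output.toList.splitOn '\n'
  let g := (PySem.List.enumerate lines).foldl
    (fun g yl =>
      (PySem.List.enumerate yl.2).foldl
        (fun g xc => g.insert (yl.1, xc.1) (String.ofList [xc.2])) g)
    (PySem.Dict.empty : PySem.Dict (Int × Int) String)
  g.items.map (fun p => (p.1.1, p.1.2, p.2))

-- ===== PRECONDITION & SPEC =====
def Spec_to_grid (ascii_output : String) (out : List (Int × Int × String)) : Prop := out = to_grid_alt ascii_output
instance (ascii_output : String) (out : List (Int × Int × String)) : Decidable (Spec_to_grid ascii_output out) := by unfold Spec_to_grid; infer_instance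

-- ===== CLAIM (what is proved, stated in full; the proofs are below) =====
def Claim_equal_to_grid : Prop := ∀ (ascii_output : String), Dom_to_grid ascii_output → Spec_to_grid ascii_output (to_grid ascii_output)

-- ===== LEMMAS AND PROOFS =====

-- A's loop body and B's two loop shapes, named for the proofs.
def pvStepA (st : PySem.Dict (Int × Int) String × Int × Int) (ch : Char) :
    PySem.Dict (Int × Int) String × Int × Int :=
  let g := st.1; let x := st.2.1; let y := st.2.2
  if ch = '\n' then (g, 0, y + 1)
  else (g.insert (y, x) (String.ofList [ch]), x + 1, y)

def pvInner (g : PySem.Dict (Int × Int) String) (y : Int) (l : List (Int × Char)) :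
    PySem.Dict (Int × Int) String :=
  l.foldl (fun g xc => g.insert (y, xc.1) (String.ofList [xc.2])) g

def pvOuter (g : PySem.Dict (Int × Int) String) (l : List (Int × List Char)) :
    PySem.Dict (Int × Int) String :=
  l.foldl (fun g yl => pvInner g yl.1 (PySem.List.enumerate yl.2)) g

lemma to_grid_eq_stepA (s : String) :
    to_grid s = ((s.toList.foldl pvStepA (PySem.Dict.empty, 0, 0)).1.items.map
      (fun p => (p.1.1, p.1.2, p.2))) := rfl

lemma splitOn_nl_cons_nl (l : List Char) : ('\n' :: l).splitOn '\n' = [] :: l.splitOn '\n' := by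
  simp [List.splitOn, List.splitOnP_cons]

lemma splitOn_nl_cons_other (c : Char) (l : List Char) (h : c ≠ '\n') :
    (c :: l).splitOn '\n' = (l.splitOn '\n').modifyHead (c :: ·) := by
  simp [List.splitOn, List.splitOnP_cons, h]

-- main invariant: A's fold from state (g, x, y) computes B's nested folds over the
-- split of the remaining characters, with the first line enumerated from x at row y.
lemma foldA_eq_nested (cs : List Char) :
    ∀ (g : PySem.Dict (Int × Int) String) (x y : Int),
      (cs.foldl pvStepA (g, x, y)).1 =
        pvOuter (pvInner g y (PySem.List.enumerate ((cs.splitOn '\n').headI) x))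
          (PySem.List.enumerate ((cs.splitOn '\n').tail) (y + 1)) := by
  induction cs with
  | nil =>
    intro g x y
    simp [List.splitOn, pvInner, pvOuter]
  | cons c rest ih =>
    intro g x y
    by_cases hc : c = '\n'
    · subst hc
      rw [List.foldl_cons, splitOn_nl_cons_nl]
      have hA : pvStepA (g, x, y) '\n' = (g, 0, y + 1) := rfl
      rw [hA, ih g 0 (y + 1)]
      obtain ⟨hd, tl, hsp⟩ := List.exists_cons_of_ne_nil (List.splitOnP_ne_nil (· == '\n') rest)
      simp only [List.splitOn] at *
      rw [hsp]
      simp only [List.headI, List.tail_cons, PySem.List.enumerate, List.foldl_cons, pvOuter,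
        pvInner, List.foldl_nil]
    · rw [List.foldl_cons, splitOn_nl_cons_other c rest hc]
      have hA : pvStepA (g, x, y) c = (g.insert (y, x) (String.ofList [c]), x + 1, y) := by
        simp [pvStepA, hc]
      rw [hA, ih _ (x + 1) y]
      obtain ⟨hd, tl, hsp⟩ := List.exists_cons_of_ne_nil (List.splitOnP_ne_nil (· == '\n') rest)
      simp only [List.splitOn] at *
      rw [hsp]
      simp only [List.modifyHead, List.headI, List.tail_cons, PySem.List.enumerate, pvInner,
        List.foldl_cons]

-- ===== VERDICT (by name: the statement is the Claim_ definition above) =====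
theorem to_grid_spec : Claim_equal_to_grid := by
  intro s _
  show to_grid s = to_grid_alt s
  rw [to_grid_eq_stepA]
  have h := foldA_eq_nested s.toList PySem.Dict.empty 0 0
  rw [h]
  obtain ⟨hd, tl, hsp⟩ := List.exists_cons_of_ne_nil (List.splitOnP_ne_nil (· == '\n') s.toList)
  simp only [to_grid_alt, List.splitOn] at *
  rw [hsp]
  simp only [List.headI, List.tail_cons, PySem.List.enumerate, List.foldl_cons, pvOuter, pvInner]
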